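-- pv_equiv track=rewrite | github.com/ta05/VarsityTutors | Python/Michael/recursion.py | split_array_53_helper
-- ===== SOURCE A (Python) =====
-- def split_array_53_helper(nums, index, threes, fives):
--     if index == len(nums):
--         return threes == fives
--     elif nums[index] % 5 == 0:
--         fives += nums[index]
--     elif nums[index] % 3 == 0:
--         threes += nums[index]
--     else:
--         return split_array_53_helper(nums, index + 1, threes + nums[index], fives) or split_array_53_helper(nums, index + 1, threes, fives + nums[index])
--     return split_array_53_helper(nums, index + 1, threes, fives)
-- ===== SOURCE B (Python) =====
-- def split_array_53_helper(nums, index, threes, fives):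
--     # Iterative subset-sum DP over the set of reachable (threes - fives) differences,
--     # instead of A's exponential branching recursion.
--     reach = {threes - fives}
--     i = index
--     while i != len(nums):
--         x = nums[i]
--         if x % 5 == 0:
--             reach = {d - x for d in reach}
--         elif x % 3 == 0:
--             reach = {d + x for d in reach}
--         else:
--             reach = {d + x for d in reach} | {d - x for d in reach}
--         i += 1
--     return 0 in reach
-- ===== Notes on version B (the rewrite author's own statement) =====
-- stated objective: alternative
-- what changed: Replaced the exponential branching recursion with a single iterative pass that maintains the set of reachable (threes - fives) differences and finally tests membership of 0.
import Mathlib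
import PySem

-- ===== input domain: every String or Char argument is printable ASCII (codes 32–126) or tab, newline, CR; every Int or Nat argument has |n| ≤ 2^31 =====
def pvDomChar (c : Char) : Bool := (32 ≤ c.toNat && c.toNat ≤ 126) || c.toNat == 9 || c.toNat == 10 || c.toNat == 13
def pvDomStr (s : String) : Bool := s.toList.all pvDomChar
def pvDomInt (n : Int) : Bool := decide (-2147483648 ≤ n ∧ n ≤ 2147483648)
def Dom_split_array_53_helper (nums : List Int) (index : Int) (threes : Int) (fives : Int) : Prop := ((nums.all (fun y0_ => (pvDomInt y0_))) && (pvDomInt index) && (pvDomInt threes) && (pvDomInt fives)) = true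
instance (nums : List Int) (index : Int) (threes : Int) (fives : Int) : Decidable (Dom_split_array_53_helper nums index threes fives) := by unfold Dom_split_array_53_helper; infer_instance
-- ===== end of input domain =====

-- B replaces A's exponential branching recursion by one iterative pass over a set of
-- reachable (threes - fives) differences; equivalence of the return values is proved on Pre_.

-- ===== PORT A =====
def split_array_53_helper (nums : List Int) (index : Int) (threes : Int) (fives : Int) : Bool :=
  if index = (nums.length : Int) then threes == fives
  else
    match h : PySem.List.pyGet? nums index with
    | none => false   -- IndexError in Python; excluded by Pre_
    | some x =>
      if PySem.Int.mod x 5 = 0 then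
        split_array_53_helper nums (index + 1) threes (fives + x)
      else if PySem.Int.mod x 3 = 0 then
        split_array_53_helper nums (index + 1) (threes + x) fives
      else
        split_array_53_helper nums (index + 1) (threes + x) fives ||
        split_array_53_helper nums (index + 1) threes (fives + x)
termination_by ((nums.length : Int) - index).toNat
decreasing_by
  all_goals
    have hin : PySem.Raise.InRange nums.length index := by
      by_contra hc
      rw [← PySem.List.pyGet?_eq_none_iff (xs := nums)] at hc
      simp [hc] at h
    unfold PySem.Raise.InRange at hin
    omega

-- ===== PORT B =====
def splitAltLoop (nums : List Int) (i : Int) (reach : PySem.Set Int) : PySem.Set Int :=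
  if i = (nums.length : Int) then reach
  else
    match h : PySem.List.pyGet? nums i with
    | none => reach   -- IndexError in Python; excluded by Pre_
    | some x =>
      splitAltLoop nums (i + 1)
        (if PySem.Int.mod x 5 = 0 then PySem.Set.ofList (reach.map (fun d => d - x))
         else if PySem.Int.mod x 3 = 0 then PySem.Set.ofList (reach.map (fun d => d + x))
         else PySem.Set.union (PySem.Set.ofList (reach.map (fun d => d + x)))
                (reach.map (fun d => d - x)))
termination_by ((nums.length : Int) - i).toNat
decreasing_by
  have hin : PySem.Raise.InRange nums.length i := by
    by_contra hc
    rw [← PySem.List.pyGet?_eq_none_iff (xs := nums)] at hc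
    simp [hc] at h
  unfold PySem.Raise.InRange at hin
  omega

def split_array_53_helper_alt (nums : List Int) (index : Int) (threes : Int) (fives : Int) : Bool :=
  PySem.Set.contains (splitAltLoop nums index (PySem.Set.ofList [threes - fives])) 0

-- ===== PRECONDITION & SPEC =====
-- Pre_ excludes exactly the inputs on which Python A raises IndexError (index out of range).
def Pre_split_array_53_helper (nums : List Int) (index : Int) (threes : Int) (fives : Int) : Prop :=
  -(nums.length : Int) ≤ index ∧ index ≤ (nums.length : Int)
instance (nums : List Int) (index : Int) (threes : Int) (fives : Int) : Decidable (Pre_split_array_53_helper nums index threes fives) := by unfold Pre_split_array_53_helper; infer_instance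

def pvWitness_split_array_53_helper : List Int × Int × Int × Int := ([3, 5, 7, 2], 0, 0, 0)

def Spec_split_array_53_helper (nums : List Int) (index : Int) (threes : Int) (fives : Int) (out : Bool) : Prop := out = split_array_53_helper_alt nums index threes fives
instance (nums : List Int) (index : Int) (threes : Int) (fives : Int) (out : Bool) : Decidable (Spec_split_array_53_helper nums index threes fives out) := by unfold Spec_split_array_53_helper; infer_instance

-- ===== CLAIM (what is proved, stated in full; the proofs are below) =====
def Claim_equal_split_array_53_helper : Prop := ∀ (nums : List Int) (index : Int) (threes : Int) (fives : Int), Dom_split_array_53_helper nums index threes fives → Pre_split_array_53_helper nums index threes fives → Spec_split_array_53_helper nums index threes fives (split_array_53_helper nums index threes fives)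

-- ===== LEMMAS AND PROOFS =====

-- A's result depends on threes and fives only through their difference.
lemma splitA_diff (nums : List Int) :
    ∀ n i t f, ((nums.length : Int) - i).toNat = n →
      split_array_53_helper nums i t f = split_array_53_helper nums i (t - f) 0 := by
  intro n
  induction n using Nat.strong_induction_on with
  | _ n ih =>
    intro i t f hn
    rw [split_array_53_helper, split_array_53_helper]
    by_cases hend : i = (nums.length : Int)
    · simp only [if_pos hend]
      simp [Int.sub_eq_zero]
    · simp only [if_neg hend]
      cases hget : PySem.List.pyGet? nums i with
      | none => rfl
      | some x =>
        have hin : PySem.Raise.InRange nums.length i := by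
          by_contra hc
          rw [← PySem.List.pyGet?_eq_none_iff (xs := nums)] at hc
          simp [hc] at hget
        unfold PySem.Raise.InRange at hin
        have hlt : ((nums.length : Int) - (i + 1)).toNat < n := by omega
        simp only
        split_ifs with h5 h3
        · rw [ih _ hlt (i+1) t (f+x) rfl, ih _ hlt (i+1) (t-f) (0+x) rfl]
          have e : t - (f + x) = t - f - (0 + x) := by ring
          rw [e]
        · rw [ih _ hlt (i+1) (t+x) f rfl, ih _ hlt (i+1) (t-f+x) 0 rfl]
          have e : t + x - f = t - f + x - 0 := by ring
          rw [e]
        · rw [ih _ hlt (i+1) (t+x) f rfl, ih _ hlt (i+1) (t-f+x) 0 rfl,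
              ih _ hlt (i+1) t (f+x) rfl, ih _ hlt (i+1) (t-f) (0+x) rfl]
          have e1 : t + x - f = t - f + x - 0 := by ring
          have e2 : t - (f + x) = t - f - (0 + x) := by ring
          rw [e1, e2]

-- The loop invariant: 0 is reachable from the final set iff A succeeds from some difference in the current set.
lemma splitAltLoop_mem (nums : List Int) :
    ∀ n (i : Int) (S : PySem.Set Int),
      ((nums.length : Int) - i).toNat = n →
      -(nums.length : Int) ≤ i → i ≤ (nums.length : Int) →
      ((0 : Int) ∈ splitAltLoop nums i S ↔
        ∃ d ∈ S, split_array_53_helper nums i d 0 = true) := by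
  intro n
  induction n using Nat.strong_induction_on with
  | _ n ih =>
    intro i S hn hlo hhi
    rw [splitAltLoop]
    by_cases hend : i = (nums.length : Int)
    · simp only [if_pos hend]
      constructor
      · intro h0
        refine ⟨0, h0, ?_⟩
        rw [split_array_53_helper, if_pos hend]
        simp
      · rintro ⟨d, hd, hA⟩
        rw [split_array_53_helper, if_pos hend] at hA
        have : d = 0 := by simpa using hA
        exact this ▸ hd
    · simp only [if_neg hend]
      cases hget : PySem.List.pyGet? nums i with
      | none =>
        exfalso
        rw [PySem.List.pyGet?_eq_none_iff] at hget
        exact hget (by unfold PySem.Raise.InRange; omega)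
      | some x =>
        have hin : PySem.Raise.InRange nums.length i := by
          by_contra hc
          rw [← PySem.List.pyGet?_eq_none_iff (xs := nums)] at hc
          simp [hc] at hget
        unfold PySem.Raise.InRange at hin
        have hlt : ((nums.length : Int) - (i + 1)).toNat < n := by omega
        have key : ∀ d, split_array_53_helper nums i d 0 = true ↔
            (if PySem.Int.mod x 5 = 0 then split_array_53_helper nums (i+1) (d - x) 0 = true
             else if PySem.Int.mod x 3 = 0 then split_array_53_helper nums (i+1) (d + x) 0 = true
             else split_array_53_helper nums (i+1) (d + x) 0 = true ∨
                  split_array_53_helper nums (i+1) (d - x) 0 = true) := by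
          intro d
          rw [split_array_53_helper, if_neg hend]
          split
          · next heq => rw [hget] at heq; cases heq
          · next y heq =>
            rw [hget] at heq
            injection heq with hy
            subst hy
            split_ifs with h5 h3
            · rw [splitA_diff nums _ (i+1) d (0+x) rfl]
              have e : d - (0 + x) = d - x := by ring
              rw [e]
            · rfl
            · rw [splitA_diff nums _ (i+1) d (0+x) rfl]
              have e : d - (0 + x) = d - x := by ring
              rw [e, Bool.or_eq_true]
        rw [ih _ hlt (i+1) _ rfl (by omega) (by omega)]
        split_ifs with h5 h3
        · constructor
          · rintro ⟨d', hd', hA⟩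
            rw [PySem.Set.mem_ofList, List.mem_map] at hd'
            obtain ⟨d, hd, rfl⟩ := hd'
            refine ⟨d, hd, ?_⟩
            rw [key d, if_pos h5]; exact hA
          · rintro ⟨d, hd, hA⟩
            rw [key d, if_pos h5] at hA
            refine ⟨d - x, ?_, hA⟩
            rw [PySem.Set.mem_ofList, List.mem_map]; exact ⟨d, hd, rfl⟩
        · constructor
          · rintro ⟨d', hd', hA⟩
            rw [PySem.Set.mem_ofList, List.mem_map] at hd'
            obtain ⟨d, hd, rfl⟩ := hd'
            refine ⟨d, hd, ?_⟩
            rw [key d, if_neg h5, if_pos h3]; exact hA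
          · rintro ⟨d, hd, hA⟩
            rw [key d, if_neg h5, if_pos h3] at hA
            refine ⟨d + x, ?_, hA⟩
            rw [PySem.Set.mem_ofList, List.mem_map]; exact ⟨d, hd, rfl⟩
        · constructor
          · rintro ⟨d', hd', hA⟩
            rw [PySem.Set.mem_union] at hd'
            rcases hd' with hd' | hd'
            · rw [PySem.Set.mem_ofList, List.mem_map] at hd'
              obtain ⟨d, hd, rfl⟩ := hd'
              refine ⟨d, hd, ?_⟩
              rw [key d, if_neg h5, if_neg h3]; exact Or.inl hA
            · rw [List.mem_map] at hd'
              obtain ⟨d, hd, rfl⟩ := hd'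
              refine ⟨d, hd, ?_⟩
              rw [key d, if_neg h5, if_neg h3]; exact Or.inr hA
          · rintro ⟨d, hd, hA⟩
            rw [key d, if_neg h5, if_neg h3] at hA
            rcases hA with hA | hA
            · refine ⟨d + x, ?_, hA⟩
              rw [PySem.Set.mem_union]
              exact Or.inl (by rw [PySem.Set.mem_ofList, List.mem_map]; exact ⟨d, hd, rfl⟩)
            · refine ⟨d - x, ?_, hA⟩
              rw [PySem.Set.mem_union]
              exact Or.inr (by rw [List.mem_map]; exact ⟨d, hd, rfl⟩)

-- ===== VERDICT (by name: the statement is the Claim_ definition above) =====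
theorem split_array_53_helper_spec : Claim_equal_split_array_53_helper := by
  intro nums index threes fives _ hpre
  obtain ⟨hlo, hhi⟩ := hpre
  unfold Spec_split_array_53_helper split_array_53_helper_alt
  have hmem := splitAltLoop_mem nums _ index (PySem.Set.ofList [threes - fives]) rfl hlo hhi
  have hc : PySem.Set.contains (splitAltLoop nums index (PySem.Set.ofList [threes - fives])) 0 = true ↔
      (0 : Int) ∈ splitAltLoop nums index (PySem.Set.ofList [threes - fives]) := by
    simp [PySem.Set.contains]
  have hd := splitA_diff nums _ index threes fives rfl
  rw [Bool.eq_iff_iff, hc, hmem]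
  constructor
  · intro hA
    refine ⟨threes - fives, ?_, by rw [← hd]; exact hA⟩
    rw [PySem.Set.mem_ofList]; simp
  · rintro ⟨d, hdm, hA⟩
    rw [PySem.Set.mem_ofList] at hdm
    simp at hdm
    rw [hd]
    exact hdm ▸ hA
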